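-- pv_equiv track=rewrite | github.com/surya20041/Litcoder-Solutions | CS-Python/Labs/Sum of Numbers With Units Digit K.py | do_something
-- ===== SOURCE A (Python) =====
-- def do_something(num, k=None):
--     if num == 0:
--         return 0
--     if k is None:
--         # Default value for k if not provided
--         k = 1
--
--     for i in range(1, num + 1):
--         t = num - k * i
--         if t >= 0 and t % 10 == 0:
--             return i
--     return -1
-- ===== SOURCE B (Python) =====
-- def do_something(num, k=None):
--     if num == 0:
--         return 0
--     if k is None:
--         k = 1
--     cands = [i for i in range(1, 11)
--              if i <= num and num - k * i >= 0 and (num - k * i) % 10 == 0]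
--     return min(cands, default=-1)
-- ===== Notes on version B (the rewrite author's own statement) =====
-- stated objective: faster
-- what changed: Instead of scanning i = 1..num for the first i with num-k*i >= 0 and divisible by 10, B collects the candidates among i = 1..10 only (residues mod 10 repeat with period 10, and a match at i > 10 implies an earlier match at i-10) and returns their minimum with default -1.
import Mathlib
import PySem

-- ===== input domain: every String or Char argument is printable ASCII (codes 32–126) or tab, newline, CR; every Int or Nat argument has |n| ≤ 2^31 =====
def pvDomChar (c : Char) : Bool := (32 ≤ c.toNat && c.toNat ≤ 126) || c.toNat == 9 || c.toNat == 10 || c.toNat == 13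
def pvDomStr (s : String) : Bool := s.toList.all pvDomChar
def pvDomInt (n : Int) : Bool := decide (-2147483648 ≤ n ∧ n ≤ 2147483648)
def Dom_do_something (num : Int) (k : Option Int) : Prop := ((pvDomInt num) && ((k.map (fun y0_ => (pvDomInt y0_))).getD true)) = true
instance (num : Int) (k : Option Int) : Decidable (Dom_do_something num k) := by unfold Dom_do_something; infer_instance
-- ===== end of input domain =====

-- B replaces A's O(num) scan for the first valid i by a constant-time check of i = 1..10 only
-- (units digits of k*i repeat with period 10), returning the minimum candidate; objective: faster.

-- ===== PORT A =====
-- the 'for i in range(1, num+1): … return i' loop with early return,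
-- recursing on the number of remaining iterations (so it evaluates lazily)
def pvLoopA (num k : Int) : Nat → Int → Int
  | 0, _ => -1
  | n + 1, i =>
      let t := num - k * i
      if t ≥ 0 ∧ PySem.Int.mod t 10 = 0 then i else pvLoopA num k n (i + 1)

def do_something (num : Int) (k : Option Int) : Int :=
  if num = 0 then 0
  else
    let kk := k.getD 1
    pvLoopA num kk num.toNat 1

-- ===== PORT B =====
def do_something_alt (num : Int) (k : Option Int) : Int :=
  if num = 0 then 0
  else
    let kk := k.getD 1
    let cands := (PySem.List.pyRange 1 11 1).filter
      (fun i => decide (i ≤ num) && decide (num - kk * i ≥ 0) &&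
                decide (PySem.Int.mod (num - kk * i) 10 = 0))
    (PySem.List.min? cands (fun x => x)).getD (-1)

-- ===== PRECONDITION & SPEC =====
def Spec_do_something (num : Int) (k : Option Int) (out : Int) : Prop := out = do_something_alt num k
instance (num : Int) (k : Option Int) (out : Int) : Decidable (Spec_do_something num k out) := by unfold Spec_do_something; infer_instance

-- ===== CLAIM (what is proved, stated in full; the proofs are below) =====
def Claim_equal_do_something : Prop := ∀ (num : Int) (k : Option Int), Dom_do_something num k → Spec_do_something num k (do_something num k)

-- ===== LEMMAS AND PROOFS =====

-- the Python-level match predicate of A's loop body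
def pvP (num k i : Int) : Bool :=
  decide (num - k * i ≥ 0) && decide (PySem.Int.mod (num - k * i) 10 = 0)

lemma pvLoopA_eq_find? (num k : Int) :
    ∀ (n : Nat) (i : Int),
      pvLoopA num k n i = ((PySem.List.pyRange i (i + n) 1).find? (pvP num k)).getD (-1) := by
  intro n
  induction n with
  | zero =>
      intro i
      rw [show i + ((0 : Nat) : Int) = i by omega,
          PySem.List.pyRange_one_eq_nil (le_refl i)]
      rfl
  | succ n ih =>
      intro i
      rw [PySem.List.pyRange_one_cons (by omega : i < i + ((n + 1 : Nat) : Int)),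
          List.find?_cons]
      cases hP : pvP num k i with
      | true =>
          have hc : num - k * i ≥ 0 ∧ PySem.Int.mod (num - k * i) 10 = 0 := by
            simp only [pvP, Bool.and_eq_true, decide_eq_true_eq] at hP; exact hP
          simp only [pvLoopA]
          rw [if_pos hc]; rfl
      | false =>
          have hc : ¬(num - k * i ≥ 0 ∧ PySem.Int.mod (num - k * i) 10 = 0) := by
            intro ⟨h1, h2⟩
            have hd : (10 : Int) ∣ num - k * i := (PySem.Int.mod_eq_zero_iff_dvd _ _).mp h2
            simp [pvP] at hP
            exact (hP (by linarith)) hd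
          simp only [pvLoopA]
          rw [if_neg hc, ih (i + 1),
              show i + 1 + (n : Int) = i + ((n + 1 : Nat) : Int) by push_cast; ring]

-- min of a strictly increasing list is its head
lemma foldl_min_of_le {x : Int} {t : List Int} (h : ∀ y ∈ t, x ≤ y) :
    t.foldl min x = x := by
  induction t generalizing x with
  | nil => rfl
  | cons y t ih =>
      have hx : min x y = x := min_eq_left (h y (by simp))
      simp only [List.foldl_cons, hx]
      exact ih (fun z hz => h z (by simp [hz]))

lemma min?_of_sorted (l : List Int) (hs : l.Pairwise (· < ·)) :
    (PySem.List.min? l (fun x => x)).getD (-1) = (l.head?).getD (-1) := by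
  cases l with
  | nil => rfl
  | cons x t =>
      rw [PySem.List.min?_id_cons]
      have : t.foldl min x = x :=
        foldl_min_of_le (fun y hy => le_of_lt ((List.pairwise_cons.mp hs).1 y hy))
      simp [this]

-- a match at i > 10 implies an earlier match at i - 10 (for num > 10)
lemma pvP_shift (num k i : Int) (hnum : 10 < num) (hi : 10 < i)
    (h : pvP num k i = true) : pvP num k (i - 10) = true := by
  simp only [pvP, Bool.and_eq_true, decide_eq_true_eq] at h ⊢
  have hmod : PySem.Int.mod (num - k * i) 10 = (num - k * i) % 10 :=
    PySem.Int.mod_eq_emod_of_pos (by norm_num)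
  have hmod' : PySem.Int.mod (num - k * (i - 10)) 10 = (num - k * (i - 10)) % 10 :=
    PySem.Int.mod_eq_emod_of_pos (by norm_num)
  rw [hmod'] ; rw [hmod] at h
  have hexp : num - k * (i - 10) = (num - k * i) + 10 * k := by ring
  constructor
  · by_cases hk : 0 ≤ k
    · have h10 : 0 ≤ 10 * k := by positivity
      rw [hexp]; linarith [h.1]
    · have hneg : k * (i - 10) ≤ 0 :=
        mul_nonpos_of_nonpos_of_nonneg (by linarith) (by omega)
      linarith
  · rw [hexp, Int.add_mul_emod_self_left]
    exact h.2

-- iterate the shift down to a match in 1..10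
lemma exists_small_match (num k : Int) (hnum : 10 < num) :
    ∀ n : Nat, ∀ i : Int, i.toNat ≤ n → 1 ≤ i → pvP num k i = true →
      ∃ j, 1 ≤ j ∧ j ≤ 10 ∧ pvP num k j = true := by
  intro n
  induction n with
  | zero => intro i h1 h2 _; omega
  | succ n ih =>
      intro i h1 h2 hP
      by_cases hsm : i ≤ 10
      · exact ⟨i, h2, hsm, hP⟩
      · exact ih (i - 10) (by omega) (by omega)
          (pvP_shift num k i hnum (by omega) hP)

lemma find?_false_of_shift (num k : Int) (hnum : 10 < num)
    (hnone : (PySem.List.pyRange 1 11 1).find? (pvP num k) = none) :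
    (PySem.List.pyRange 11 (num + 1) 1).find? (pvP num k) = none := by
  rw [List.find?_eq_none] at hnone ⊢
  intro i hi
  rw [PySem.List.mem_pyRange_one] at hi
  intro hP
  obtain ⟨j, hj1, hj2, hjP⟩ :=
    exists_small_match num k hnum i.toNat i (le_refl _) (by omega) hP
  exact hnone j (by rw [PySem.List.mem_pyRange_one]; omega) hjP

-- the predicate with the extra 'i ≤ num' test, as written in B
def pvQ (num k i : Int) : Bool :=
  decide (i ≤ num) && decide (num - k * i ≥ 0) && decide (PySem.Int.mod (num - k * i) 10 = 0)

lemma find?_congr' {p q : Int → Bool} {l : List Int} (h : ∀ x ∈ l, p x = q x) :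
    l.find? p = l.find? q := by
  induction l with
  | nil => rfl
  | cons x t ih =>
      have hx := h x (by simp)
      simp only [List.find?_cons, hx]
      cases hq : q x with
      | true => rfl
      | false => exact ih (fun y hy => h y (by simp [hy]))

-- main range lemma: first match over 1..num = first match (with the i ≤ num test) over 1..10
lemma find?_range_eq (num k : Int) :
    (PySem.List.pyRange 1 (num + 1) 1).find? (pvP num k)
      = (PySem.List.pyRange 1 11 1).find? (pvQ num k) := by
  by_cases hle : num ≤ 10
  · by_cases h0 : num ≤ 0
    · -- left range empty, right predicate everywhere false (i ≤ num fails)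
      rw [PySem.List.pyRange_one_eq_nil (by omega)]
      rw [List.find?_nil, Eq.comm, List.find?_eq_none]
      intro i hi
      rw [PySem.List.mem_pyRange_one] at hi
      simp only [pvQ]
      rw [decide_eq_false (show ¬ i ≤ num by omega)]
      simp
    · -- 1..num+1 is a prefix of 1..11; on it pvQ = pvP, past num pvQ is false
      rw [PySem.List.pyRange_one_append 1 (num + 1) 11 (by omega) (by omega),
          List.find?_append]
      have h1 : (PySem.List.pyRange 1 (num + 1) 1).find? (pvQ num k)
          = (PySem.List.pyRange 1 (num + 1) 1).find? (pvP num k) := by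
        apply find?_congr'
        intro i hi
        rw [PySem.List.mem_pyRange_one] at hi
        have ht : decide (i ≤ num) = true := decide_eq_true (by omega)
        simp only [pvQ, pvP, ht, Bool.true_and]
      have h2 : (PySem.List.pyRange (num + 1) 11 1).find? (pvQ num k) = none := by
        rw [List.find?_eq_none]
        intro i hi
        rw [PySem.List.mem_pyRange_one] at hi
        simp only [pvQ]
        rw [decide_eq_false (show ¬ i ≤ num by omega)]
        simp
      rw [h1, h2]
      cases hf : (PySem.List.pyRange 1 (num + 1) 1).find? (pvP num k) <;> simp
  · have hgt : 10 < num := by omega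
    -- num > 10: split 1..num+1 at 11; on 1..10 pvQ = pvP; no match past 10 without one before
    rw [PySem.List.pyRange_one_append 1 11 (num + 1) (by omega) (by omega),
        List.find?_append]
    have h1 : (PySem.List.pyRange 1 11 1).find? (pvQ num k)
        = (PySem.List.pyRange 1 11 1).find? (pvP num k) := by
      apply find?_congr'
      intro i hi
      rw [PySem.List.mem_pyRange_one] at hi
      have ht : decide (i ≤ num) = true := decide_eq_true (by omega)
      simp only [pvQ, pvP, ht, Bool.true_and]
    rw [h1]
    cases hf : (PySem.List.pyRange 1 11 1).find? (pvP num k) with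
    | some v => simp
    | none => simp [find?_false_of_shift num k hgt hf]

lemma head?_filter_eq_find? (p : Int → Bool) (l : List Int) :
    (l.filter p).head? = l.find? p := by
  induction l with
  | nil => rfl
  | cons x t ih =>
      simp only [List.filter_cons, List.find?_cons]
      cases hp : p x <;> simp [ih]

-- ===== VERDICT (by name: the statement is the Claim_ definition above) =====
theorem do_something_spec : Claim_equal_do_something := by
  intro num k _
  unfold Spec_do_something do_something do_something_alt
  by_cases h0 : num = 0
  · simp [h0]
  · rw [if_neg h0, if_neg h0]
    have hrange : PySem.List.pyRange 1 (1 + (num.toNat : Int)) 1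
        = PySem.List.pyRange 1 (num + 1) 1 := by
      by_cases hn : 0 ≤ num
      · rw [show (1 : Int) + (num.toNat : Int) = num + 1 by omega]
      · rw [PySem.List.pyRange_one_eq_nil (by omega),
            PySem.List.pyRange_one_eq_nil (by omega)]
    calc pvLoopA num (k.getD 1) num.toNat 1
        = ((PySem.List.pyRange 1 (num + 1) 1).find? (pvP num (k.getD 1))).getD (-1) := by
          rw [pvLoopA_eq_find? num (k.getD 1) num.toNat 1, hrange]
      _ = ((PySem.List.pyRange 1 11 1).find? (pvQ num (k.getD 1))).getD (-1) := by
          rw [find?_range_eq]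
      _ = (((PySem.List.pyRange 1 11 1).filter (pvQ num (k.getD 1))).head?).getD (-1) := by
          rw [head?_filter_eq_find?]
      _ = (PySem.List.min? ((PySem.List.pyRange 1 11 1).filter (pvQ num (k.getD 1)))
            (fun x => x)).getD (-1) := by
          rw [min?_of_sorted _ (List.Pairwise.filter _ (PySem.List.pairwise_lt_pyRange_one 1 11))]
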